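-- pv_equiv track=rewrite | github.com/paulgazz/kmax | kmax/patch.py | get_lines_to_build_for_removed
-- ===== SOURCE A (Python) =====
-- def get_lines_to_build_for_removed(added_lines, removed_lines):
--   """Get the list of lines that need building due to removed lines.
--
--   These are the unchanged lines that used to be just above the removed lines.
--
--   As in unified diff format, added lines is the line numbers after the patch
--   is applied, and removed lines is the line numbers before the patch is applied.
--   """
--   if not removed_lines:
--     return []
--   added_lines = sorted(list(set(added_lines)))
--   removed_lines = sorted(list(set(removed_lines)))
--
--   # First, map the removed lines to the unchanged lines that need building,
--   # but line numbers in the unpatched state.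
--   lines2build_unpatched = []
--   for i, line_num in enumerate(removed_lines):
--     # If the line before line_num is also removed, then they require the
--     # same unchanged line to be built. In this case, no need to add any
--     # additional line.
--     if i > 0 and removed_lines[i-1] == (line_num - 1):
--       continue
--     else:
--       # Map to the unchanged line just before this line.
--       lines2build_unpatched.append(line_num - 1)
--
--   # lines2build_unpatched includes the line numbers "before the patch is
--   # applied". However, removing/adding lines change their position in the
--   # new file. Map them to their position in the new file.
--   # To achieve this, traverse three lists at the same time: added_lines,
--   # removed_lines, and lines2build_unpatched. Added lines require to shift
--   # forwards while removed lines require to shift backwards.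
--   lines2build = []
--   shift = 0
--   added_lines_idx = 0
--   removed_lines_idx = 0
--   for l in lines2build_unpatched:
--     # For each removed line above l, shift l backwards.
--     while removed_lines_idx < len(removed_lines) and removed_lines[removed_lines_idx] < l:
--       shift -= 1
--       removed_lines_idx += 1
--     # For each line added at this point on, shift l forwards.
--     while added_lines_idx < len(added_lines) and added_lines[added_lines_idx] <= (l + shift):
--       shift += 1
--       added_lines_idx += 1
--     # Add the line by applying the shift
--     lines2build.append(l + shift)
--   assert len(lines2build) > 0 and lines2build[0] >= 0
--
--   # Edge case: if the first line is removed, it maps to line 0, which does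
--   # not exist. Map it to the first line in the new file.
--   if lines2build[0] == 0:
--     lines2build[0] = 1
--
--   return lines2build
-- ===== SOURCE B (Python) =====
-- def get_lines_to_build_for_removed(added_lines, removed_lines):
--   """Get the list of lines that need building due to removed lines.
--
--   Closed-form per-line computation: the unchanged line above each run of
--   removed lines sits, after dropping the removals, at position r - 1 - i
--   (i removed lines lie below it); re-inserting the added lines pushes it
--   up by the number of added lines a_j with a_j - j <= that position.
--   """
--   if not removed_lines:
--     return []
--   removed_set = set(removed_lines)
--   removed = sorted(removed_set)
--   added = sorted(set(added_lines))
--   # one position per run of consecutive removed lines (r starts a run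
--   # iff the line just above it is not removed)
--   positions = [r - 1 - i for i, r in enumerate(removed) if r - 1 not in removed_set]
--   result = [p + sum(1 for j, a in enumerate(added) if a - j <= p) for p in positions]
--   assert result and result[0] >= 0
--   if result[0] == 0:
--     result[0] = 1
--   return result
-- ===== Notes on version B (the rewrite author's own statement) =====
-- stated objective: simpler
-- what changed: Replaces A's index-adjacency first pass and stateful three-pointer merge (persistent shift/removed_idx/added_idx while-loops) by a closed form per run of removed lines: a run start is a removed line r with r-1 not removed, its unpatched-minus-removals position is p = r-1-i (i = its index in the sorted deduped removed list), and the final line is p plus the count of added lines with a_j - j <= p.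
import Mathlib
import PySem

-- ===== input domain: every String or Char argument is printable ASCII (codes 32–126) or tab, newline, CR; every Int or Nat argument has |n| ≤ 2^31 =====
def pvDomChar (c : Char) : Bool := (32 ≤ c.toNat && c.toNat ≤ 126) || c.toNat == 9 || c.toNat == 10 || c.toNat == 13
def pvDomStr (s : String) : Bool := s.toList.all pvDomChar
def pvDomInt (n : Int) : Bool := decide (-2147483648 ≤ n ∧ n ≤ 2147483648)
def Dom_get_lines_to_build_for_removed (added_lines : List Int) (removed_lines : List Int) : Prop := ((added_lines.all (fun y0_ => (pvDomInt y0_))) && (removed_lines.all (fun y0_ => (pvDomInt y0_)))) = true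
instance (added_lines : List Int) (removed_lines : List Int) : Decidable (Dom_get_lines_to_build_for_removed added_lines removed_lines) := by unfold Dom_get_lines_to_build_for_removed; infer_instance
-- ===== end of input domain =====

-- B replaces A's stateful three-pointer merge by a closed-form position count per run of
-- removed lines (objective: simpler); equal return values on Pre_ (removed line numbers ≥ 1).


-- ===== PORT A =====
-- the first inner while loop: advance over removed lines below l, shifting backwards
def pvAdvR (rs : List Int) (l : Int) (idx : Nat) (shift : Int) : Nat × Int :=
  if h : idx < rs.length then
    if rs[idx] < l then pvAdvR rs l (idx + 1) (shift - 1) else (idx, shift)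
  else (idx, shift)
termination_by rs.length - idx

-- the second inner while loop: advance over added lines at or below l + shift, shifting forwards
def pvAdvA (as_ : List Int) (l : Int) (idx : Nat) (shift : Int) : Nat × Int :=
  if h : idx < as_.length then
    if as_[idx] ≤ l + shift then pvAdvA as_ l (idx + 1) (shift + 1) else (idx, shift)
  else (idx, shift)
termination_by as_.length - idx

def get_lines_to_build_for_removed (added_lines : List Int) (removed_lines : List Int) : List Int :=
  if removed_lines = [] then []
  else
    let added := PySem.List.sorted (PySem.Set.ofList added_lines) (fun x => x) false
    let removed := PySem.List.sorted (PySem.Set.ofList removed_lines) (fun x => x) false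
    let lines2build_unpatched := (PySem.List.enumerate removed 0).foldl (fun acc p =>
      if p.1 > 0 ∧ PySem.List.pyGet? removed (p.1 - 1) = some (p.2 - 1) then acc
      else acc ++ [p.2 - 1]) []
    -- for l in lines2build_unpatched: two while loops advancing (removed_idx, added_idx, shift)
    let st := lines2build_unpatched.foldl (fun (st : List Int × Int × Nat × Nat) l =>
      let r1 := pvAdvR removed l st.2.2.1 st.2.1
      let r2 := pvAdvA added l st.2.2.2 r1.2
      (st.1 ++ [l + r2.2], r2.2, r1.1, r2.1)) ([], 0, 0, 0)
    match st.1 with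
    | [] => []
    | x :: t => if x = 0 then 1 :: t else x :: t

-- ===== PORT B =====
def get_lines_to_build_for_removed_alt (added_lines : List Int) (removed_lines : List Int) : List Int :=
  if removed_lines = [] then []
  else
    let removed_set := PySem.Set.ofList removed_lines
    let removed := PySem.List.sorted removed_set (fun x => x) false
    let added := PySem.List.sorted (PySem.Set.ofList added_lines) (fun x => x) false
    let positions := ((PySem.List.enumerate removed 0).filter
      (fun p => !(PySem.Set.contains removed_set (p.2 - 1)))).map (fun p => p.2 - 1 - p.1)
    let result := positions.map (fun p =>
      p + ((PySem.List.enumerate added 0).countP (fun q => decide (q.2 - q.1 ≤ p)) : Int))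
    match result with
    | [] => []
    | x :: t => if x = 0 then 1 :: t else x :: t

-- ===== PRECONDITION & SPEC =====
-- first line A maps (min removed - 1, shifted up by the added lines at or below it):
-- A's `assert` (and B's, kept identical) fails exactly when this is negative
def pvFirstBuild (added_lines : List Int) (removed_lines : List Int) : Int :=
  match PySem.List.sorted (PySem.Set.ofList removed_lines) (fun x => x) false with
  | [] => 0
  | r :: _ =>
    r - 1 + ((PySem.List.enumerate (PySem.List.sorted (PySem.Set.ofList added_lines) (fun x => x) false) 0).countP
        (fun q => decide (q.2 - q.1 ≤ r - 1)) : Int)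

-- Pre_ excludes exactly the inputs where the Python A raises (its assertion fails because the
-- first mapped line would be negative); B keeps the same assertion and raises there too.
def Pre_get_lines_to_build_for_removed (added_lines : List Int) (removed_lines : List Int) : Prop :=
  removed_lines = [] ∨ 0 ≤ pvFirstBuild added_lines removed_lines
instance (added_lines : List Int) (removed_lines : List Int) : Decidable (Pre_get_lines_to_build_for_removed added_lines removed_lines) := by unfold Pre_get_lines_to_build_for_removed; infer_instance

def pvWitness_get_lines_to_build_for_removed : List Int × List Int := ([3], [2, 3, 5])

def Spec_get_lines_to_build_for_removed (added_lines : List Int) (removed_lines : List Int) (out : List Int) : Prop := out = get_lines_to_build_for_removed_alt added_lines removed_lines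
instance (added_lines : List Int) (removed_lines : List Int) (out : List Int) : Decidable (Spec_get_lines_to_build_for_removed added_lines removed_lines out) := by unfold Spec_get_lines_to_build_for_removed; infer_instance

-- ===== CLAIM (what is proved, stated in full; the proofs are below) =====
def Claim_equal_get_lines_to_build_for_removed : Prop := ∀ (added_lines : List Int) (removed_lines : List Int), Dom_get_lines_to_build_for_removed added_lines removed_lines → Pre_get_lines_to_build_for_removed added_lines removed_lines → Spec_get_lines_to_build_for_removed added_lines removed_lines (get_lines_to_build_for_removed added_lines removed_lines)

-- ===== LEMMAS AND PROOFS =====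

-- A's final line for the unchanged line l, in closed form
def pvF (rs as_ : List Int) (l : Int) : Int :=
  l - (rs.countP (fun r => decide (r < l)) : Int)
    + ((PySem.List.enumerate as_ 0).countP
        (fun q => decide (q.2 - q.1 ≤ l - (rs.countP (fun r => decide (r < l)) : Int))) : Int)


lemma pv_countP_le_of_tail_fails {α : Type} (p : α → Bool) (xs : List α) (n : Nat)
    (h2 : ∀ k (hk : k < xs.length), n ≤ k → ¬ p xs[k] = true) : xs.countP p ≤ n := by
  have hd : (xs.drop n).countP p = 0 := by
    rw [List.countP_eq_zero]
    intro a ha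
    obtain ⟨i, hi, rfl⟩ := List.mem_iff_getElem.1 ha
    rw [List.getElem_drop]
    have hlen : n + i < xs.length := by simp [List.length_drop] at hi; omega
    exact h2 (n + i) hlen (by omega)
  calc xs.countP p = (xs.take n).countP p + (xs.drop n).countP p := by
        rw [← List.countP_append, List.take_append_drop]
    _ ≤ n := by
        have := List.countP_le_length (p := p) (l := xs.take n)
        simp [List.length_take] at this
        omega

lemma pv_countP_prefix {α : Type} (p : α → Bool) (xs : List α) (n : Nat) (hn : n ≤ xs.length)
    (h1 : ∀ k (hk : k < n), p (xs[k]'(lt_of_lt_of_le hk hn)) = true)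
    (h2 : ∀ k (hk : k < xs.length), n ≤ k → ¬ p xs[k] = true) : xs.countP p = n := by
  have hle := pv_countP_le_of_tail_fails p xs n h2
  have ht : (xs.take n).countP p = n := by
    rw [List.countP_eq_length.2]
    · simp [List.length_take]; omega
    · intro a ha
      obtain ⟨i, hi, rfl⟩ := List.mem_iff_getElem.1 ha
      have hi' : i < n := by simp [List.length_take] at hi; omega
      rw [List.getElem_take]
      exact h1 i hi'
  have : xs.countP p = (xs.take n).countP p + (xs.drop n).countP p := by
    rw [← List.countP_append, List.take_append_drop]
  omega

lemma pv_sorted_gap (xs : List Int) (hs : xs.Pairwise (· < ·)) (i j : Nat)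
    (hij : i ≤ j) (hj : j < xs.length) :
    xs[i]'(lt_of_le_of_lt hij hj) + ((j : Int) - i) ≤ xs[j] := by
  have hg := List.pairwise_iff_getElem.1 hs
  induction j with
  | zero => interval_cases i; simp
  | succ m ih =>
    rcases Nat.lt_or_ge i (m+1) with h | h
    · have him : i ≤ m := by omega
      have hm : m < xs.length := by omega
      have := ih him hm
      have hstep := hg m (m+1) hm hj (by omega)
      push_cast
      omega
    · have : i = m + 1 := by omega
      subst this; simp

lemma pv_lt_of_lt_countP (rs : List Int) (hs : rs.Pairwise (· < ·)) (l : Int) (k : Nat)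
    (hk : k < rs.length) (h : k < rs.countP (fun r => decide (r < l))) : rs[k] < l := by
  by_contra h'
  push Not at h'
  have hle := pv_countP_le_of_tail_fails (fun r => decide (r < l)) rs k ?_
  · omega
  · intro j hj hkj
    have := pv_sorted_gap rs hs k j hkj hj
    simp only [decide_eq_true_eq]
    omega

lemma pv_T_of_lt_countP (as_ : List Int) (has : as_.Pairwise (· < ·)) (c : Int) (k : Nat)
    (hk : k < as_.length)
    (h : k < (PySem.List.enumerate as_ 0).countP (fun q => decide (q.2 - q.1 ≤ c))) :
    as_[k] - (k : Int) ≤ c := by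
  by_contra h'
  push Not at h'
  have hle := pv_countP_le_of_tail_fails (fun q : Int × Int => decide (q.2 - q.1 ≤ c))
      (PySem.List.enumerate as_ 0) k ?_
  · omega
  · intro j hj hkj
    rw [PySem.List.length_enumerate] at hj
    rw [PySem.List.getElem_enumerate]
    have := pv_sorted_gap as_ has k j hkj hj
    simp only [decide_eq_true_eq]
    omega

lemma pv_len_le_of_interval (xs : List Int) (a b : Int) (hab : a ≤ b)
    (hs : xs.Pairwise (· < ·)) (hmem : ∀ x ∈ xs, a ≤ x ∧ x < b) :
    (xs.length : Int) ≤ b - a := by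
  induction xs generalizing a with
  | nil => simp; omega
  | cons x t ih =>
    have hx := hmem x (by simp)
    have ht : ∀ y ∈ t, x + 1 ≤ y ∧ y < b := by
      intro y hy
      exact ⟨by have := (List.pairwise_cons.1 hs).1 y hy; omega, (hmem y (by simp [hy])).2⟩
    have := ih (x + 1) (by omega) (List.pairwise_cons.1 hs).2 ht
    simp only [List.length_cons]
    push_cast
    omega

lemma pv_pos_mono (rs : List Int) (hs : rs.Pairwise (· < ·)) (l0 l : Int) (h : l0 ≤ l) :
    l0 - (rs.countP (fun r => decide (r < l0)) : Int)
      ≤ l - (rs.countP (fun r => decide (r < l)) : Int) := by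
  have hsplit : ∀ ys : List Int, ys.countP (fun r => decide (r < l)) ≤
      ys.countP (fun r => decide (r < l0)) + ys.countP (fun r => (decide (l0 ≤ r) && decide (r < l))) := by
    intro ys
    induction ys with
    | nil => simp
    | cons x t ih =>
      simp only [List.countP_cons]
      by_cases h1 : x < l0
      · have h2 : x < l := by omega
        simp [h1, h2]; omega
      · by_cases h2 : x < l
        · have h3 : l0 ≤ x := by omega
          simp [h1, h2, h3]; omega
        · simp [h1, h2]; omega
  have hmid : ((rs.countP (fun r => (decide (l0 ≤ r) && decide (r < l))) : Int)) ≤ l - l0 := by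
    rw [List.countP_eq_length_filter]
    apply pv_len_le_of_interval _ l0 l h
    · exact List.Pairwise.sublist List.filter_sublist hs
    · intro x hx
      have := List.of_mem_filter hx
      simpa using this
  have := hsplit rs
  omega

lemma pv_advR_spec (rs : List Int) (hs : rs.Pairwise (· < ·)) (l : Int) :
    ∀ (ri : Nat) (shift : Int), ri ≤ rs.length →
    (∀ k (hk : k < rs.length), k < ri → rs[k] < l) →
    pvAdvR rs l ri shift =
      (rs.countP (fun r => decide (r < l)),
       shift - ((rs.countP (fun r => decide (r < l)) : Int) - ri)) := by
  have main : ∀ (n ri : Nat) (shift : Int), rs.length - ri = n → ri ≤ rs.length →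
      (∀ k (hk : k < rs.length), k < ri → rs[k] < l) →
      pvAdvR rs l ri shift =
        (rs.countP (fun r => decide (r < l)),
         shift - ((rs.countP (fun r => decide (r < l)) : Int) - ri)) := by
    intro n
    induction n with
    | zero =>
      intro ri shift hn hri hpre
      have hri' : ri = rs.length := by omega
      have hc : rs.countP (fun r => decide (r < l)) = ri := by
        apply pv_countP_prefix _ _ ri (by omega)
        · intro k hk
          simpa using hpre k (by omega) hk
        · intro k hk hge
          omega
      rw [pvAdvR, dif_neg (by omega)]
      rw [hc]
      simp
    | succ m ih =>
      intro ri shift hn hri hpre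
      have hlt : ri < rs.length := by omega
      rw [pvAdvR, dif_pos hlt]
      by_cases hc : rs[ri] < l
      · rw [if_pos hc]
        have hpre' : ∀ k (hk : k < rs.length), k < ri + 1 → rs[k] < l := by
          intro k hk hkri
          rcases Nat.lt_or_ge k ri with h | h
          · exact hpre k hk h
          · have : k = ri := by omega
            subst this; exact hc
        rw [ih (ri + 1) (shift - 1) (by omega) (by omega) hpre']
        simp only [Prod.mk.injEq]
        exact ⟨trivial, by push_cast; ring⟩
      · rw [if_neg hc]
        have hcnt : rs.countP (fun r => decide (r < l)) = ri := by
          apply pv_countP_prefix _ _ ri (by omega)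
          · intro k hk
            simpa using hpre k (by omega) hk
          · intro k hk hge
            have := pv_sorted_gap rs hs ri k hge hk
            simp only [decide_eq_true_eq]
            omega
        rw [hcnt]
        simp
  intro ri shift hri hpre
  exact main (rs.length - ri) ri shift rfl hri hpre

lemma pv_advA_spec (as_ : List Int) (has : as_.Pairwise (· < ·)) (l c : Int) :
    ∀ (ai : Nat) (shift : Int), ai ≤ as_.length →
    shift = c - l + ai →
    (∀ k (hk : k < as_.length), k < ai → as_[k] - (k : Int) ≤ c) →
    pvAdvA as_ l ai shift =
      ((PySem.List.enumerate as_ 0).countP (fun q => decide (q.2 - q.1 ≤ c)),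
       c - l + ((PySem.List.enumerate as_ 0).countP (fun q => decide (q.2 - q.1 ≤ c)) : Int)) := by
  have main : ∀ (n ai : Nat) (shift : Int), as_.length - ai = n → ai ≤ as_.length →
      shift = c - l + ai →
      (∀ k (hk : k < as_.length), k < ai → as_[k] - (k : Int) ≤ c) →
      pvAdvA as_ l ai shift =
        ((PySem.List.enumerate as_ 0).countP (fun q => decide (q.2 - q.1 ≤ c)),
         c - l + ((PySem.List.enumerate as_ 0).countP (fun q => decide (q.2 - q.1 ≤ c)) : Int)) := by
    intro n
    induction n with
    | zero =>
      intro ai shift hn hai hsh hpre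
      have hai' : ai = as_.length := by omega
      have hc : (PySem.List.enumerate as_ 0).countP (fun q => decide (q.2 - q.1 ≤ c)) = ai := by
        apply pv_countP_prefix _ _ ai (by simp [PySem.List.length_enumerate]; omega)
        · intro k hk
          have hk' : k < as_.length := by omega
          rw [PySem.List.getElem_enumerate]
          simpa using hpre k hk' hk
        · intro k hk hge
          rw [PySem.List.length_enumerate] at hk
          omega
      rw [pvAdvA, dif_neg (by omega)]
      rw [hc, hsh]
    | succ m ih =>
      intro ai shift hn hai hsh hpre
      have hlt : ai < as_.length := by omega
      rw [pvAdvA, dif_pos hlt]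
      by_cases hc : as_[ai] ≤ l + shift
      · rw [if_pos hc]
        have hpre' : ∀ k (hk : k < as_.length), k < ai + 1 → as_[k] - (k : Int) ≤ c := by
          intro k hk hkai
          rcases Nat.lt_or_ge k ai with h | h
          · exact hpre k hk h
          · have : k = ai := by omega
            subst this
            omega
        rw [ih (ai + 1) (shift + 1) (by omega) (by omega) (by push_cast; omega) hpre']
      · rw [if_neg hc]
        have hcnt : (PySem.List.enumerate as_ 0).countP (fun q => decide (q.2 - q.1 ≤ c)) = ai := by
          apply pv_countP_prefix _ _ ai (by simp [PySem.List.length_enumerate]; omega)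
          · intro k hk
            have hk' : k < as_.length := by omega
            rw [PySem.List.getElem_enumerate]
            simpa using hpre k hk' hk
          · intro k hk hge
            rw [PySem.List.length_enumerate] at hk
            rw [PySem.List.getElem_enumerate]
            have := pv_sorted_gap as_ has ai k hge hk
            simp only [decide_eq_true_eq]
            omega
        rw [hcnt, hsh]
  intro ai shift hai hsh hpre
  exact main (as_.length - ai) ai shift rfl hai hsh hpre

lemma pv_adj_iff_mem (rs : List Int) (hs : rs.Pairwise (· < ·)) (k : Nat) (hk : k < rs.length) :
    ((k : Int) > 0 ∧ PySem.List.pyGet? rs ((k : Int) - 1) = some (rs[k] - 1)) ↔ rs[k] - 1 ∈ rs := by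
  have hg := List.pairwise_iff_getElem.1 hs
  constructor
  · rintro ⟨hpos, hget⟩
    exact PySem.List.mem_of_pyGet?_eq_some rs hget
  · intro hmem
    obtain ⟨j, hj, hval⟩ := List.mem_iff_getElem.1 hmem
    have hjk : j < k := by
      by_contra hge
      push Not at hge
      rcases Nat.eq_or_lt_of_le hge with h | h
      · subst h; omega
      · have := hg k j hk hj h; omega
    have hj1 : j = k - 1 := by
      by_contra hne
      have hj2 : j < k - 1 := by omega
      have h1 := pv_sorted_gap rs hs j (k - 1) (by omega) (by omega)
      have h2 := hg (k - 1) k (by omega) hk (by omega)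
      have : ((k : Int) - 1) - j ≥ 1 := by
        have : (1 : Int) ≤ ((k - 1 : Nat) : Int) - (j : Int) := by omega
        omega
      omega
    have hkpos : 0 < k := by omega
    refine ⟨by exact_mod_cast hkpos, ?_⟩
    have : ((k : Int) - 1) = ((k - 1 : Nat) : Int) := by push_cast [hkpos]; omega
    rw [this, PySem.List.pyGet?_natCast]
    rw [List.getElem?_eq_getElem (by omega)]
    subst hj1
    rw [hval]
  -- done

lemma pv_pos_eq (rs : List Int) (hs : rs.Pairwise (· < ·)) (k : Nat) (hk : k < rs.length)
    (hnot : rs[k] - 1 ∉ rs) :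
    rs.countP (fun r => decide (r < rs[k] - 1)) = k := by
  apply pv_countP_prefix _ _ k (by omega)
  · intro j hj
    have hlt := List.pairwise_iff_getElem.1 hs j k (by omega) hk hj
    have hne : rs[j] ≠ rs[k] - 1 := by
      intro h
      exact hnot (h ▸ List.getElem_mem _)
    simp only [decide_eq_true_eq]
    omega
  · intro j hj hge
    have := pv_sorted_gap rs hs k j hge hj
    simp only [decide_eq_true_eq]
    omega

lemma pv_fold2 (rs as_ : List Int) (hrs : rs.Pairwise (· < ·)) (has : as_.Pairwise (· < ·)) :
    ∀ (ls : List Int), ls.Pairwise (· < ·) →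
    ∀ (acc : List Int) (ri ai : Nat), ri ≤ rs.length → ai ≤ as_.length →
    (∀ l ∈ ls, ∀ k (hk : k < rs.length), k < ri → rs[k] < l) →
    (∀ l ∈ ls, ∀ k (hk : k < as_.length), k < ai →
        as_[k] - (k : Int) ≤ l - (rs.countP (fun r => decide (r < l)) : Int)) →
    (ls.foldl (fun (st : List Int × Int × Nat × Nat) l =>
      let r1 := pvAdvR rs l st.2.2.1 st.2.1
      let r2 := pvAdvA as_ l st.2.2.2 r1.2
      (st.1 ++ [l + r2.2], r2.2, r1.1, r2.1)) (acc, ((ai : Int) - ri), ri, ai)).1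
      = acc ++ ls.map (pvF rs as_) := by
  intro ls
  induction ls with
  | nil => intro _ acc ri ai _ _ _ _; simp
  | cons l0 t ih =>
    intro hls acc ri ai hri hai hR hA
    have hmem0 : l0 ∈ l0 :: t := by simp
    rw [List.foldl_cons]
    have e1 := pv_advR_spec rs hrs l0 ri ((ai : Int) - ri) hri
      (fun k hk h => hR l0 hmem0 k hk h)
    have e2 := pv_advA_spec as_ has l0 (l0 - (rs.countP (fun r => decide (r < l0)) : Int)) ai
      (((ai : Int) - ri) - ((rs.countP (fun r => decide (r < l0)) : Int) - (ri : Int)))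
      hai (by ring) (fun k hk h => hA l0 hmem0 k hk h)
    simp only [e1, e2]
    -- names for the two counts
    set R0 := rs.countP (fun r => decide (r < l0)) with hR0
    set A0 := (PySem.List.enumerate as_ 0).countP
      (fun q => decide (q.2 - q.1 ≤ l0 - (R0 : Int))) with hA0
    have hsh : l0 - (R0 : Int) - l0 + (A0 : Int) = ((A0 : Int) - (R0 : Int)) := by ring
    have hx : l0 + ((A0 : Int) - (R0 : Int)) = pvF rs as_ l0 := by
      simp only [pvF, ← hR0, ← hA0]; ring
    rw [hsh, hx]
    have hR0le : R0 ≤ rs.length := by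
      rw [hR0]; exact List.countP_le_length
    have hA0le : A0 ≤ as_.length := by
      rw [hA0]
      have := List.countP_le_length
        (p := fun q : Int × Int => decide (q.2 - q.1 ≤ l0 - (R0 : Int)))
        (l := PySem.List.enumerate as_ 0)
      rwa [PySem.List.length_enumerate] at this
    have hlt0 : ∀ l ∈ t, l0 < l := fun l hl => (List.pairwise_cons.1 hls).1 l hl
    rw [ih (List.pairwise_cons.1 hls).2 (acc ++ [pvF rs as_ l0]) R0 A0 hR0le hA0le ?_ ?_]
    · simp
    · intro l hl k hk hkR
      have h1 : rs[k] < l0 := pv_lt_of_lt_countP rs hrs l0 k hk (by omega)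
      have := hlt0 l hl
      omega
    · intro l hl k hk hkA
      have h1 : as_[k] - (k : Int) ≤ l0 - (R0 : Int) :=
        pv_T_of_lt_countP as_ has (l0 - (R0 : Int)) k hk (by omega)
      have h2 := pv_pos_mono rs hrs l0 l (le_of_lt (hlt0 l hl))
      rw [← hR0] at h2
      omega

-- ===== VERDICT (by name: the statement is the Claim_ definition above) =====
theorem get_lines_to_build_for_removed_spec : Claim_equal_get_lines_to_build_for_removed := by
  intro added_lines removed_lines hdom hpre
  unfold Spec_get_lines_to_build_for_removed
  unfold get_lines_to_build_for_removed get_lines_to_build_for_removed_alt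
  by_cases hnil : removed_lines = []
  · simp [hnil]
  · simp only [if_neg hnil]
    set rset := PySem.Set.ofList removed_lines with hrset
    set rs := PySem.List.sorted rset (fun x => x) false with hrsdef
    set as_ := PySem.List.sorted (PySem.Set.ofList added_lines) (fun x => x) false with hasdef
    have hrs : rs.Pairwise (· < ·) := by
      rw [hrsdef, hrset]; exact PySem.List.sorted_ofList_pairwise_lt removed_lines
    have has : as_.Pairwise (· < ·) := by
      rw [hasdef]; exact PySem.List.sorted_ofList_pairwise_lt added_lines
    have hmemrs : ∀ x : Int, x ∈ rs ↔ x ∈ rset := by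
      intro x; rw [hrsdef, PySem.List.mem_sorted]
    have hflip : (PySem.List.enumerate rs 0).foldl (fun acc p =>
        if p.1 > 0 ∧ PySem.List.pyGet? rs (p.1 - 1) = some (p.2 - 1) then acc
        else acc ++ [p.2 - 1]) []
      = ((PySem.List.enumerate rs 0).filter
          (fun p => !(PySem.Set.contains rset (p.2 - 1)))).map (fun p => p.2 - 1) := by
      have hfun : (fun (acc : List Int) (p : Int × Int) =>
          if p.1 > 0 ∧ PySem.List.pyGet? rs (p.1 - 1) = some (p.2 - 1) then acc
          else acc ++ [p.2 - 1])
        = (fun acc p => if ¬ (p.1 > 0 ∧ PySem.List.pyGet? rs (p.1 - 1) = some (p.2 - 1))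
            then acc ++ [p.2 - 1] else acc) := by
        funext acc p
        by_cases h : p.1 > 0 ∧ PySem.List.pyGet? rs (p.1 - 1) = some (p.2 - 1) <;> simp [h]
      rw [hfun, PySem.List.foldl_append_ite]
      rw [List.nil_append]
      congr 1
      apply List.filter_congr
      intro p hp
      obtain ⟨k, hk, rfl⟩ := (PySem.List.mem_enumerate_iff rs 0 p).1 hp
      have hadj := pv_adj_iff_mem rs hrs k hk
      by_cases h : rs[k] - 1 ∈ rs
      · have h2 := hadj.2 h
        have hcon : PySem.Set.contains rset (rs[k] - 1) = true := by
          rw [PySem.Set.contains_iff]; exact (hmemrs _).1 h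
        simp only [zero_add, hcon, Bool.not_true]
        have hk0 := h2.1
        simp [h2.2]
        omega
      · have hcon : PySem.Set.contains rset (rs[k] - 1) = false := by
          rw [← Bool.not_eq_true, PySem.Set.contains_iff]
          intro hmem; exact h ((hmemrs _).2 hmem)
        have h2 : ¬ ((k : Int) > 0 ∧ PySem.List.pyGet? rs ((k : Int) - 1) = some (rs[k] - 1)) := by
          intro hx; exact h (hadj.1 hx)
        simp only [zero_add, hcon, Bool.not_false]
        simp
        by_cases hk0 : k = 0
        · exact Or.inl hk0
        · right
          intro hb
          exact h2 ⟨by omega, hb⟩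
    rw [hflip]
    have henum : (PySem.List.enumerate rs 0).Pairwise (fun p q => p.2 < q.2) := by
      rw [List.pairwise_iff_getElem]
      intro i j hi hj hij
      rw [PySem.List.length_enumerate] at hi hj
      rw [PySem.List.getElem_enumerate, PySem.List.getElem_enumerate]
      exact List.pairwise_iff_getElem.1 hrs i j hi hj hij
    have hF : ((PySem.List.enumerate rs 0).filter
        (fun p => !(PySem.Set.contains rset (p.2 - 1)))).Pairwise (fun p q => p.2 < q.2) :=
      List.Pairwise.sublist List.filter_sublist henum
    have hls : (((PySem.List.enumerate rs 0).filter
        (fun p => !(PySem.Set.contains rset (p.2 - 1)))).map (fun p => p.2 - 1)).Pairwise (· < ·) :=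
      List.Pairwise.map _ (fun a b h => by omega) hF
    have hfold := pv_fold2 rs as_ hrs has _ hls [] 0 0 (by omega) (by omega)
      (by intro l _ k _ h; omega) (by intro l _ k _ h; omega)
    simp only [Nat.cast_zero, sub_zero, List.nil_append] at hfold
    rw [hfold]
    congr 1
    simp only [List.map_map]
    apply List.map_congr_left
    intro p hp
    have hpe := List.mem_of_mem_filter hp
    have hcond := List.of_mem_filter hp
    obtain ⟨k, hk, rfl⟩ := (PySem.List.mem_enumerate_iff rs 0 p).1 hpe
    have hnot : rs[k] - 1 ∉ rs := by
      intro hmem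
      have hcon2 : rs[k] - 1 ∈ rset := (hmemrs _).1 hmem
      simp at hcond
      exact hcond hcon2
    have hcount := pv_pos_eq rs hrs k hk hnot
    simp only [Function.comp, zero_add, pvF, hcount]
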